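-- pv_equiv track=rewrite | github.com/sanjaykn8/Sign2Note | ml_service/notes_generator.py | template_notes_from_tokens
-- ===== SOURCE A (Python) =====
-- from typing import List, Optional
--
-- def template_notes_from_tokens(tokens: List[str], title: Optional[str]=None) -> str:
--     """
--     Simple deterministic notes generator for demo.
--     """
--     if title is None:
--         title = "Generated Notes"
--     md = []
--     md.append(f"# {title}\n")
--     md.append("**Summary:**\n")
--     md.append("This document summarizes the content detected from the sign language video. Below are expanded sections and key points.\n\n")
--     # group tokens into pseudo sections of 6 tokens
--     chunk_size = 6
--     for i in range(0, len(tokens), chunk_size):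
--         chunk = tokens[i:i+chunk_size]
--         heading = chunk[0] if chunk else "Section"
--         md.append(f"## **{heading}**\n")
--         for t in chunk:
--             md.append(f"- *{t}* — Expanded explanation about **{t}**. Add more detail here based on context.\n")
--         md.append("\n")
--     md.append("**Conclusion:**\n")
--     md.append("The above notes are auto-generated. Use them as a baseline and edit for accuracy.\n")
--     return "".join(md)
-- ===== SOURCE B (Python) =====
-- from typing import List, Optional
--
-- def template_notes_from_tokens(tokens: List[str], title: Optional[str]=None) -> str:
--     """
--     Single flat pass over enumerate(tokens): the 6-token chunk structure is
--     recovered from the index (i % 6 == 0 opens a section, i % 6 == 5 or the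
--     last token closes it), so no inner loop and no slicing is needed.
--     """
--     if title is None:
--         title = "Generated Notes"
--     md = [f"# {title}\n",
--           "**Summary:**\n",
--           "This document summarizes the content detected from the sign language video. Below are expanded sections and key points.\n\n"]
--     n = len(tokens)
--     for i, t in enumerate(tokens):
--         if i % 6 == 0:
--             md.append(f"## **{t}**\n")
--         md.append(f"- *{t}* — Expanded explanation about **{t}**. Add more detail here based on context.\n")
--         if i % 6 == 5 or i == n - 1:
--             md.append("\n")
--     md.append("**Conclusion:**\n")
--     md.append("The above notes are auto-generated. Use them as a baseline and edit for accuracy.\n")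
--     return "".join(md)
-- ===== Notes on version B (the rewrite author's own statement) =====
-- stated objective: simpler
-- what changed: Replaced the nested structure (outer loop over chunk start indices, slicing out each 6-token chunk, plus an inner loop over the chunk) by a single flat pass over enumerate(tokens) that derives the section boundaries arithmetically from the index (i % 6 == 0 opens a section, i % 6 == 5 or the last token closes it), eliminating the inner loop and all slicing.
import Mathlib
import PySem

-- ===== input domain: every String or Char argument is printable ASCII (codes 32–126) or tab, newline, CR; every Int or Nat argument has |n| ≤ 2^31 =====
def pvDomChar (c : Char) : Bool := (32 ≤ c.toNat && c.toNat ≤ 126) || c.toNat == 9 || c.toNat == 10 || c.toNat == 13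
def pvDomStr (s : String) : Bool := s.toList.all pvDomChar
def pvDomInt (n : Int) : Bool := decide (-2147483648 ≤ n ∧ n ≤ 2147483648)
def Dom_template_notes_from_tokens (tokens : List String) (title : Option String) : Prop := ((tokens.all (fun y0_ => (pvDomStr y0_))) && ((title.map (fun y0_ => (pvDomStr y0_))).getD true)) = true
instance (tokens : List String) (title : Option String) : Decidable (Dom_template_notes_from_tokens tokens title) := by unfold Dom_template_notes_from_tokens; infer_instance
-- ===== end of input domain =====

-- B replaces A's chunked nested loops (index range + slice + inner loop) by one flat pass over
-- enumerate(tokens) that derives section boundaries from i % 6; same output, simpler single loop.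

-- ===== PORT A =====
def template_notes_from_tokens (tokens : List String) (title : Option String) : String :=
  let title := match title with | none => "Generated Notes" | some t => t
  let md : List String := []
  let md := md ++ ["# " ++ title ++ "\n"]
  let md := md ++ ["**Summary:**\n"]
  let md := md ++ ["This document summarizes the content detected from the sign language video. Below are expanded sections and key points.\n\n"]
  let chunk_size : Int := 6
  let md := (PySem.List.pyRange 0 (PySem.List.len tokens) chunk_size).foldl (fun md i =>
      let chunk := PySem.List.slice tokens (some i) (some (i + chunk_size))
      let heading := match chunk with | [] => "Section" | h :: _ => h
      let md := md ++ ["## **" ++ heading ++ "**\n"]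
      let md := chunk.foldl (fun md t =>
        md ++ ["- *" ++ t ++ "* — Expanded explanation about **" ++ t ++ "**. Add more detail here based on context.\n"]) md
      md ++ ["\n"]) md
  let md := md ++ ["**Conclusion:**\n"]
  let md := md ++ ["The above notes are auto-generated. Use them as a baseline and edit for accuracy.\n"]
  PySem.Str.join "" md

-- ===== PORT B =====
def template_notes_from_tokens_alt (tokens : List String) (title : Option String) : String :=
  let title := match title with | none => "Generated Notes" | some t => t
  let md : List String :=
    ["# " ++ title ++ "\n",
     "**Summary:**\n",
     "This document summarizes the content detected from the sign language video. Below are expanded sections and key points.\n\n"]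
  let n := PySem.List.len tokens
  let md := (PySem.List.enumerate tokens).foldl (fun md p =>
      let md := if PySem.Int.mod p.1 6 = 0 then md ++ ["## **" ++ p.2 ++ "**\n"] else md
      let md := md ++ ["- *" ++ p.2 ++ "* — Expanded explanation about **" ++ p.2 ++ "**. Add more detail here based on context.\n"]
      if PySem.Int.mod p.1 6 = 5 ∨ p.1 = n - 1 then md ++ ["\n"] else md) md
  let md := md ++ ["**Conclusion:**\n"]
  let md := md ++ ["The above notes are auto-generated. Use them as a baseline and edit for accuracy.\n"]
  PySem.Str.join "" md

-- ===== PRECONDITION & SPEC =====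
def Spec_template_notes_from_tokens (tokens : List String) (title : Option String) (out : String) : Prop := out = template_notes_from_tokens_alt tokens title
instance (tokens : List String) (title : Option String) (out : String) : Decidable (Spec_template_notes_from_tokens tokens title out) := by unfold Spec_template_notes_from_tokens; infer_instance

-- ===== CLAIM (what is proved, stated in full; the proofs are below) =====
def Claim_equal_template_notes_from_tokens : Prop := ∀ (tokens : List String) (title : Option String), Dom_template_notes_from_tokens tokens title → Spec_template_notes_from_tokens tokens title (template_notes_from_tokens tokens title)

-- ===== LEMMAS AND PROOFS =====

def pvBullet (t : String) : String :=
  "- *" ++ t ++ "* — Expanded explanation about **" ++ t ++ "**. Add more detail here based on context.\n"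

def pvSec (c : List String) : List String :=
  ("## **" ++ c.headD "Section" ++ "**\n") :: (c.map pvBullet ++ ["\n"])

def pvSecRec (ts : List String) : List String :=
  if ts = [] then [] else pvSec (ts.take 6) ++ pvSecRec (ts.drop 6)
termination_by ts.length
decreasing_by
  rename_i h
  cases ts with
  | nil => exact absurd rfl h
  | cons a t => simp [List.length_drop]

lemma pvSecRec_nil : pvSecRec [] = [] := by rw [pvSecRec]; simp

lemma pvSecRec_cons {ts : List String} (h : ts ≠ []) :
    pvSecRec ts = pvSec (ts.take 6) ++ pvSecRec (ts.drop 6) := by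
  rw [pvSecRec]; rw [if_neg h]

def pvFB (n : Int) (p : Int × String) : List String :=
  (if PySem.Int.mod p.1 6 = 0 then ["## **" ++ p.2 ++ "**\n"] else []) ++
    ([pvBullet p.2] ++ (if PySem.Int.mod p.1 6 = 5 ∨ p.1 = n - 1 then ["\n"] else []))

lemma pvMod6 (i : Int) : PySem.Int.mod i 6 = i % 6 := by
  simp [PySem.Int.mod]
  rw [Int.fmod_eq_emod_of_nonneg]
  norm_num

lemma pvFlatMap_congr {α β : Type} {l : List α} {f g : α → List β}
    (h : ∀ x ∈ l, f x = g x) : l.flatMap f = l.flatMap g := by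
  induction l with
  | nil => rfl
  | cons a t ih =>
    simp only [List.flatMap_cons]
    rw [h a (by simp), ih (fun x hx => h x (by simp [hx]))]

lemma pyRange6_nil {n : Int} (h : n ≤ 0) : PySem.List.pyRange 0 n 6 = [] := by
  rw [PySem.List.pyRange_of_pos 0 n (by norm_num)]
  rw [if_neg (by omega)]
  simp

lemma pyRange6_peel {n : Int} (h : 0 < n) :
    PySem.List.pyRange 0 n 6 = 0 :: (PySem.List.pyRange 0 (n - 6) 6).map (· + 6) := by
  rw [PySem.List.pyRange_of_pos 0 n (by norm_num),
      PySem.List.pyRange_of_pos 0 (n - 6) (by norm_num)]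
  rw [if_pos h]
  by_cases h6 : 0 < n - 6
  · rw [if_pos h6]
    have hc : ((n - 0 + 6 - 1) / 6).toNat = ((n - 6 - 0 + 6 - 1) / 6).toNat + 1 := by omega
    rw [hc, List.range_succ_eq_map]
    simp only [List.map_cons, List.map_map]
    refine List.cons_eq_cons.mpr ⟨by norm_num, ?_⟩
    refine List.map_congr_left (fun k _ => ?_)
    simp only [Function.comp]
    push_cast
    ring
  · rw [if_neg h6]
    have hc : ((n - 0 + 6 - 1) / 6).toNat = 1 := by omega
    rw [hc]
    simp

lemma pvSliceShift (ts : List String) (i : Int) (hi : 0 ≤ i) :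
    PySem.List.slice ts (some (i + 6)) (some (i + 6 + 6)) =
      PySem.List.slice (ts.drop 6) (some i) (some (i + 6)) := by
  rw [PySem.List.slice_toNat _ (by omega) (by omega),
      PySem.List.slice_toNat _ hi (by omega)]
  rw [List.drop_drop]
  have e1 : (i + 6 + 6).toNat - (i + 6).toNat = (i + 6).toNat - i.toNat := by omega
  have e2 : (i + 6).toNat = i.toNat + 6 := by omega
  rw [e1, e2, Nat.add_comm 6 i.toNat]

lemma pvSecA_flat (ts : List String) :
    (PySem.List.pyRange 0 (ts.length : Int) 6).flatMap
      (fun i => pvSec (PySem.List.slice ts (some i) (some (i + 6)))) = pvSecRec ts := by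
  by_cases hts : ts = []
  · subst hts; simp [pyRange6_nil, pvSecRec_nil]
  · have hn : 0 < (ts.length : Int) := by
      have := List.length_pos_iff.mpr hts; omega
    rw [pyRange6_peel hn, List.flatMap_cons, List.flatMap_map]
    have h0 : PySem.List.slice ts (some 0) (some (0 + 6)) = ts.take 6 := by
      rw [PySem.List.slice_toNat _ (by norm_num) (by norm_num)]
      norm_num
      omega
    rw [pvFlatMap_congr (fun i hi => by
      have h0i : 0 ≤ i := by
        rcases (PySem.List.mem_pyRange_iff_of_pos (by norm_num) i).mp hi with ⟨h1, _⟩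
        omega
      exact congrArg pvSec (pvSliceShift ts i h0i))]
    rw [pvSecRec_cons hts, h0]
    by_cases h6 : ts.length ≤ 6
    · have hd : ts.drop 6 = [] := by
        apply List.drop_eq_nil_of_le; omega
      rw [pyRange6_nil (by omega), hd, pvSecRec_nil]
      simp
    · have hl : (ts.length : Int) - 6 = ((ts.drop 6).length : Int) := by
        simp [List.length_drop]; omega
      rw [hl, pvSecA_flat (ts.drop 6)]
termination_by ts.length
decreasing_by
  cases ts with
  | nil => exact absurd rfl hts
  | cons a t => simp [List.length_drop]

lemma pvSecB_flat (ts : List String) (s n : Int) (hs : s % 6 = 0)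
    (hn : n = s + ts.length) :
    (PySem.List.enumerate ts s).flatMap (pvFB n) = pvSecRec ts := by
  rcases ts with _ | ⟨a, _ | ⟨b, _ | ⟨c, _ | ⟨d, _ | ⟨e, _ | ⟨g, rest⟩⟩⟩⟩⟩⟩
  · simp [pvSecRec_nil, PySem.List.enumerate]
  · -- length 1
    simp only [List.length_cons, List.length_nil] at hn
    push_cast at hn
    simp only [PySem.List.enumerate_cons, PySem.List.enumerate_nil, List.flatMap_cons,
      List.flatMap_nil, pvFB, pvMod6, List.append_nil]
    rw [if_pos hs]
    rw [if_pos (show (s) % 6 = 5 ∨ s = n - 1 by omega)]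
    rw [pvSecRec_cons (by simp)]
    simp [pvSec, pvSecRec_nil]
  · -- length 2
    simp only [List.length_cons, List.length_nil] at hn
    push_cast at hn
    simp only [PySem.List.enumerate_cons, PySem.List.enumerate_nil, List.flatMap_cons,
      List.flatMap_nil, pvFB, pvMod6, List.append_nil]
    rw [if_pos hs]
    rw [if_neg (show ¬((s) % 6 = 5 ∨ s = n - 1) by omega)]
    rw [if_neg (show ¬((s + 1) % 6 = 0) by omega)]
    rw [if_pos (show (s + 1) % 6 = 5 ∨ s + 1 = n - 1 by omega)]
    rw [pvSecRec_cons (by simp)]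
    simp [pvSec, pvSecRec_nil]
  · -- length 3
    simp only [List.length_cons, List.length_nil] at hn
    push_cast at hn
    simp only [PySem.List.enumerate_cons, PySem.List.enumerate_nil, List.flatMap_cons,
      List.flatMap_nil, pvFB, pvMod6, List.append_nil]
    rw [if_pos hs]
    rw [if_neg (show ¬((s) % 6 = 5 ∨ s = n - 1) by omega)]
    rw [if_neg (show ¬((s + 1) % 6 = 0) by omega)]
    rw [if_neg (show ¬((s + 1) % 6 = 5 ∨ s + 1 = n - 1) by omega)]
    rw [if_neg (show ¬((s + 1 + 1) % 6 = 0) by omega)]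
    rw [if_pos (show (s + 1 + 1) % 6 = 5 ∨ s + 1 + 1 = n - 1 by omega)]
    rw [pvSecRec_cons (by simp)]
    simp [pvSec, pvSecRec_nil]
  · -- length 4
    simp only [List.length_cons, List.length_nil] at hn
    push_cast at hn
    simp only [PySem.List.enumerate_cons, PySem.List.enumerate_nil, List.flatMap_cons,
      List.flatMap_nil, pvFB, pvMod6, List.append_nil]
    rw [if_pos hs]
    rw [if_neg (show ¬((s) % 6 = 5 ∨ s = n - 1) by omega)]
    rw [if_neg (show ¬((s + 1) % 6 = 0) by omega)]
    rw [if_neg (show ¬((s + 1) % 6 = 5 ∨ s + 1 = n - 1) by omega)]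
    rw [if_neg (show ¬((s + 1 + 1) % 6 = 0) by omega)]
    rw [if_neg (show ¬((s + 1 + 1) % 6 = 5 ∨ s + 1 + 1 = n - 1) by omega)]
    rw [if_neg (show ¬((s + 1 + 1 + 1) % 6 = 0) by omega)]
    rw [if_pos (show (s + 1 + 1 + 1) % 6 = 5 ∨ s + 1 + 1 + 1 = n - 1 by omega)]
    rw [pvSecRec_cons (by simp)]
    simp [pvSec, pvSecRec_nil]
  · -- length 5
    simp only [List.length_cons, List.length_nil] at hn
    push_cast at hn
    simp only [PySem.List.enumerate_cons, PySem.List.enumerate_nil, List.flatMap_cons,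
      List.flatMap_nil, pvFB, pvMod6, List.append_nil]
    rw [if_pos hs]
    rw [if_neg (show ¬((s) % 6 = 5 ∨ s = n - 1) by omega)]
    rw [if_neg (show ¬((s + 1) % 6 = 0) by omega)]
    rw [if_neg (show ¬((s + 1) % 6 = 5 ∨ s + 1 = n - 1) by omega)]
    rw [if_neg (show ¬((s + 1 + 1) % 6 = 0) by omega)]
    rw [if_neg (show ¬((s + 1 + 1) % 6 = 5 ∨ s + 1 + 1 = n - 1) by omega)]
    rw [if_neg (show ¬((s + 1 + 1 + 1) % 6 = 0) by omega)]
    rw [if_neg (show ¬((s + 1 + 1 + 1) % 6 = 5 ∨ s + 1 + 1 + 1 = n - 1) by omega)]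
    rw [if_neg (show ¬((s + 1 + 1 + 1 + 1) % 6 = 0) by omega)]
    rw [if_pos (show (s + 1 + 1 + 1 + 1) % 6 = 5 ∨ s + 1 + 1 + 1 + 1 = n - 1 by omega)]
    rw [pvSecRec_cons (by simp)]
    simp [pvSec, pvSecRec_nil]
  · -- length ≥ 6
    simp only [List.length_cons, List.length_nil] at hn
    push_cast at hn
    simp only [PySem.List.enumerate_cons, List.flatMap_cons, pvFB, pvMod6]
    rw [if_pos hs]
    rw [if_neg (show ¬((s) % 6 = 5 ∨ s = n - 1) by omega)]
    rw [if_neg (show ¬((s + 1) % 6 = 0) by omega)]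
    rw [if_neg (show ¬((s + 1) % 6 = 5 ∨ s + 1 = n - 1) by omega)]
    rw [if_neg (show ¬((s + 1 + 1) % 6 = 0) by omega)]
    rw [if_neg (show ¬((s + 1 + 1) % 6 = 5 ∨ s + 1 + 1 = n - 1) by omega)]
    rw [if_neg (show ¬((s + 1 + 1 + 1) % 6 = 0) by omega)]
    rw [if_neg (show ¬((s + 1 + 1 + 1) % 6 = 5 ∨ s + 1 + 1 + 1 = n - 1) by omega)]
    rw [if_neg (show ¬((s + 1 + 1 + 1 + 1) % 6 = 0) by omega)]
    rw [if_neg (show ¬((s + 1 + 1 + 1 + 1) % 6 = 5 ∨ s + 1 + 1 + 1 + 1 = n - 1) by omega)]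
    rw [if_neg (show ¬((s + 1 + 1 + 1 + 1 + 1) % 6 = 0) by omega)]
    rw [if_pos (show (s + 1 + 1 + 1 + 1 + 1) % 6 = 5 ∨ s + 1 + 1 + 1 + 1 + 1 = n - 1 by omega)]
    have hsix : s + 1 + 1 + 1 + 1 + 1 + 1 = s + 6 := by ring
    rw [hsix, pvSecB_flat rest (s + 6) n (by omega) (by omega)]
    conv_rhs => rw [pvSecRec_cons (show (a :: b :: c :: d :: e :: g :: rest) ≠ [] by simp)]
    simp [pvSec, pvBullet]
termination_by ts.length
decreasing_by
  simp only [List.length_cons] at *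
  omega

-- ===== VERDICT (by name: the statement is the Claim_ definition above) =====
theorem template_notes_from_tokens_spec : Claim_equal_template_notes_from_tokens := by
  unfold Claim_equal_template_notes_from_tokens
  intro tokens title _
  unfold Spec_template_notes_from_tokens
  unfold template_notes_from_tokens template_notes_from_tokens_alt
  dsimp only
  have hA : (fun (md : List String) (i : Int) =>
      List.foldl (fun md t =>
          md ++ ["- *" ++ t ++ "* — Expanded explanation about **" ++ t ++ "**. Add more detail here based on context.\n"])
        (md ++ ["## **" ++ (match PySem.List.slice tokens (some i) (some (i + 6)) with
                            | [] => "Section" | h :: _ => h) ++ "**\n"])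
        (PySem.List.slice tokens (some i) (some (i + 6))) ++ ["\n"]) =
      fun md i => md ++ pvSec (PySem.List.slice tokens (some i) (some (i + 6))) := by
    funext md i
    rw [PySem.List.foldl_append_singleton_eq_map]
    cases PySem.List.slice tokens (some i) (some (i + 6)) <;>
      simp [pvSec, pvBullet]
    rfl
  have hB : (fun (md : List String) (p : Int × String) =>
      if PySem.Int.mod p.1 6 = 5 ∨ p.1 = PySem.List.len tokens - 1 then
        ((if PySem.Int.mod p.1 6 = 0 then md ++ ["## **" ++ p.2 ++ "**\n"] else md) ++
          ["- *" ++ p.2 ++ "* — Expanded explanation about **" ++ p.2 ++ "**. Add more detail here based on context.\n"]) ++ ["\n"]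
      else
        (if PySem.Int.mod p.1 6 = 0 then md ++ ["## **" ++ p.2 ++ "**\n"] else md) ++
          ["- *" ++ p.2 ++ "* — Expanded explanation about **" ++ p.2 ++ "**. Add more detail here based on context.\n"]) =
      fun md p => md ++ pvFB (PySem.List.len tokens) p := by
    funext md p
    simp only [pvFB, pvBullet]
    split_ifs <;> simp
  rw [hA, hB, PySem.List.foldl_append_eq_flatMap, PySem.List.foldl_append_eq_flatMap]
  have hlen : PySem.List.len tokens = (tokens.length : Int) := by
    simp [PySem.List.len]
  rw [hlen, pvSecA_flat tokens, pvSecB_flat tokens 0 (tokens.length : Int) (by omega) (by omega)]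
  simp
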